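-- pv_equiv track=rewrite | github.com/PriteshThorat/OS-Practical | pr12.py | find_contiguous_free
-- ===== SOURCE A (Python) =====
-- def find_contiguous_free(blocks, size):
--         n = len(blocks)
--         if size <= 0 or size > n:
--                 return -1
--         run = 0
--         start = 0
--         for i in range(n):
--                 if blocks[i] is None:
--                         if run == 0:
--                                 start = i
--                         run += 1
--                         if run >= size:
--                                 return start
--                 else:
--                         run = 0
--         return -1
-- ===== SOURCE B (Python) =====
-- def find_contiguous_free(blocks, size):
--     n = len(blocks)
--     if size <= 0 or size > n:
--         return -1
--     for i in range(n - size + 1):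
--         if all(x is None for x in blocks[i:i+size]):
--             return i
--     return -1
-- ===== Notes on version B (the rewrite author's own statement) =====
-- stated objective: idiomatic
-- what changed: Replaces A's incremental run-length counter (run/start state over one scan) with a direct first-fit search: for each candidate start, test the whole window blocks[i:i+size] with all(...).
import Mathlib
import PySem

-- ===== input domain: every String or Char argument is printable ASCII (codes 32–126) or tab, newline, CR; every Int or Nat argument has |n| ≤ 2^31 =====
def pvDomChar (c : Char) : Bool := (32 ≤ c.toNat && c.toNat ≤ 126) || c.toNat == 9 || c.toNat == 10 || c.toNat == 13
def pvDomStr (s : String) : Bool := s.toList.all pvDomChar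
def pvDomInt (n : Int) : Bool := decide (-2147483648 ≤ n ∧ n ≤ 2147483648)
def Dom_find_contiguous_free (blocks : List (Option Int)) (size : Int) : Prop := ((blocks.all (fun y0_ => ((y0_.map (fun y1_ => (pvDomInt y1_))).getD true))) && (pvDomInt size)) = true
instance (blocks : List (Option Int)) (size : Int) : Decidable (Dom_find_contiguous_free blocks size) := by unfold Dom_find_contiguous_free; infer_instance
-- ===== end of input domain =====

-- B replaces A's incremental run-length counter with a direct first-fit window scan (idiomatic, same results; O(n·size) vs A's O(n)).

-- ===== PORT A =====
-- the 'for i in range(n)' loop of A, carrying (i, run, start); early return on run >= size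
def fcfLoop (size : Int) : List (Option Int) → Int → Int → Int → Int
  | [], _i, _run, _start => -1
  | b :: rest, i, run, start =>
    match b with
    | none =>
      let start' := if run = 0 then i else start
      let run' := run + 1
      if size ≤ run' then start' else fcfLoop size rest (i + 1) run' start'
    | some _ => fcfLoop size rest (i + 1) 0 start

def find_contiguous_free (blocks : List (Option Int)) (size : Int) : Int :=
  if size ≤ 0 ∨ (blocks.length : Int) < size then -1
  else fcfLoop size blocks 0 0 0

-- ===== PORT B =====
def find_contiguous_free_alt (blocks : List (Option Int)) (size : Int) : Int :=
  let n : Int := blocks.length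
  if size ≤ 0 ∨ n < size then -1
  else
    match (PySem.List.pyRange 0 (n - size + 1) 1).find?
        (fun i => (PySem.List.slice blocks (some i) (some (i + size))).all (fun x => x.isNone)) with
    | some i => i
    | none => -1

-- ===== PRECONDITION & SPEC =====
def Spec_find_contiguous_free (blocks : List (Option Int)) (size : Int) (out : Int) : Prop := out = find_contiguous_free_alt blocks size
instance (blocks : List (Option Int)) (size : Int) (out : Int) : Decidable (Spec_find_contiguous_free blocks size out) := by unfold Spec_find_contiguous_free; infer_instance

-- ===== CLAIM (what is proved, stated in full; the proofs are below) =====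
def Claim_equal_find_contiguous_free : Prop := ∀ (blocks : List (Option Int)) (size : Int), Dom_find_contiguous_free blocks size → Spec_find_contiguous_free blocks size (find_contiguous_free blocks size)

-- ===== LEMMAS AND PROOFS =====

-- first index j with a fully-free window of length s starting at j (none if there is no such window)
def pvF (s : Nat) : List (Option Int) → Option Nat
  | [] => none
  | x :: t =>
    if s ≤ t.length + 1 ∧ ((x :: t).take s).all Option.isNone then some 0
    else (pvF s t).map (· + 1)

lemma pvF_none (s : Nat) : ∀ l : List (Option Int), l.length < s → pvF s l = none := by
  intro l
  induction l with
  | nil => intro _; rfl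
  | cons x t ih =>
    intro h
    simp only [List.length_cons] at h
    unfold pvF
    rw [if_neg (fun hc => absurd hc.1 (by omega))]
    rw [ih (by omega)]
    rfl

lemma pvF_full (s : Nat) (hs : 0 < s) (t : List (Option Int)) :
    pvF s (List.replicate s (none : Option Int) ++ t) = some 0 := by
  obtain ⟨m, rfl⟩ : ∃ m, s = m + 1 := ⟨s - 1, by omega⟩
  rw [List.replicate_succ, List.cons_append]
  unfold pvF
  rw [if_pos]
  constructor
  · simp only [List.length_append, List.length_replicate]; omega
  · simp only [List.take_succ_cons, List.take_append, List.take_replicate,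
      List.length_replicate, min_self, Nat.sub_self, List.take_zero, List.append_nil]
    simp

lemma pvF_shift (s : Nat) (hs : 0 < s) (v : Int) (t : List (Option Int)) :
    ∀ run : Nat, run < s →
      pvF s (List.replicate run (none : Option Int) ++ some v :: t) = (pvF s t).map (· + (run + 1)) := by
  intro run
  induction run with
  | zero =>
    intro _
    simp only [List.replicate_zero, List.nil_append]
    conv_lhs => rw [pvF]
    rw [if_neg (fun hc => by
      obtain ⟨m, rfl⟩ : ∃ m, s = m + 1 := ⟨s - 1, by omega⟩
      simp [List.take_succ_cons] at hc)]
  | succ run ih =>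
    intro hr
    rw [List.replicate_succ, List.cons_append]
    conv_lhs => rw [pvF]
    rw [if_neg]
    · rw [ih (by omega), Option.map_map]
      apply Option.map_congr
      intro j _
      simp [Function.comp]
      omega
    · obtain ⟨m, rfl⟩ : ∃ m, s = m + 1 := ⟨s - 1, by omega⟩
      intro hc
      have := hc.2
      rw [List.take_succ_cons, List.take_append, List.take_replicate,
        List.length_replicate] at this
      have hmin : min m run = run := by omega
      rw [hmin] at this
      obtain ⟨k, hk⟩ : ∃ k, m - run = k + 1 := ⟨m - run - 1, by omega⟩
      rw [hk, List.take_succ_cons] at this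
      simp at this

lemma fcfLoop_eq (size : Int) (hs : 0 < size) :
    ∀ (l : List (Option Int)) (run : Nat) (i start : Int), (run : Int) < size →
      (0 < run → start = i - run) →
      fcfLoop size l i (run : Int) start =
        (match pvF size.toNat (List.replicate run (none : Option Int) ++ l) with
          | some j => (i - run) + j
          | none => -1) := by
  intro l
  induction l with
  | nil =>
    intro run i start hr _
    rw [pvF_none size.toNat _ (by simp; omega)]
    rfl
  | cons b t ih =>
    intro run i start hr hinv
    match b with
    | some v =>
      show fcfLoop size (some v :: t) i run start = _
      rw [fcfLoop]
      have h0 := ih 0 (i + 1) start (by exact_mod_cast hs) (by omega)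
      simp only [Nat.cast_zero, List.replicate_zero, List.nil_append, sub_zero] at h0
      rw [h0]
      rw [pvF_shift size.toNat (by omega) v t run (by omega)]
      cases h : pvF size.toNat t with
      | none => simp
      | some j => simp only [Option.map_some]; push_cast; ring
    | none =>
      show fcfLoop size ((none : Option Int) :: t) i run start = _
      rw [fcfLoop]
      have hst : (if (run : Int) = 0 then i else start) = i - run := by
        by_cases h0 : run = 0
        · simp [h0]
        · rw [if_neg (by exact_mod_cast h0), hinv (Nat.pos_of_ne_zero h0)]
      simp only [hst]
      by_cases hle : size ≤ (run : Int) + 1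
      · rw [if_pos hle]
        have hsz : size.toNat = run + 1 := by omega
        have : List.replicate run (none : Option Int) ++ (none : Option Int) :: t
            = List.replicate (run + 1) (none : Option Int) ++ t := by
          rw [List.replicate_succ']; simp
        rw [this, ← hsz, pvF_full size.toNat (by omega) t]
        simp
      · rw [if_neg hle]
        have h1 : ((run : Int) + 1) = ((run + 1 : Nat) : Int) := by push_cast; ring
        rw [h1, ih (run + 1) (i + 1) (i - run) (by push_cast; omega) (by intro _; push_cast; ring)]
        have : List.replicate run (none : Option Int) ++ (none : Option Int) :: t
            = List.replicate (run + 1) (none : Option Int) ++ t := by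
          rw [List.replicate_succ']; simp
        rw [this]
        cases h : pvF size.toNat (List.replicate (run + 1) (none : Option Int) ++ t) with
        | none => rfl
        | some j => push_cast; ring

lemma find_range_eq_pvF (s : Nat) (hs : 0 < s) :
    ∀ l : List (Option Int), s ≤ l.length →
      (List.range (l.length - s + 1)).find? (fun j => ((l.drop j).take s).all Option.isNone) = pvF s l := by
  intro l
  induction l with
  | nil => intro h; simp at h; omega
  | cons x t ih =>
    intro h
    have hk : (x :: t).length - s + 1 = (t.length + 1 - s) + 1 := by simp
    rw [hk, List.range_succ_eq_map]
    by_cases hp : ((x :: t).take s).all Option.isNone = true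
    · have h1 : List.find? (fun j => (((x :: t).drop j).take s).all Option.isNone)
          (0 :: (List.range (t.length + 1 - s)).map Nat.succ) = some 0 := by simp [hp]
      rw [h1, pvF, if_pos ⟨by simpa using h, hp⟩]
    · have h1 : List.find? (fun j => (((x :: t).drop j).take s).all Option.isNone)
          (0 :: (List.range (t.length + 1 - s)).map Nat.succ)
          = List.find? (fun j => (((x :: t).drop j).take s).all Option.isNone)
            ((List.range (t.length + 1 - s)).map Nat.succ) := by simp [hp]
      rw [h1, List.find?_map, pvF, if_neg (fun hc => hp hc.2)]
      by_cases hst : s ≤ t.length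
      · have ht : t.length + 1 - s = t.length - s + 1 := by omega
        have h2 : ((fun j => (((x :: t).drop j).take s).all Option.isNone) ∘ Nat.succ)
            = (fun j => ((t.drop j).take s).all Option.isNone) := by
          funext j; simp [List.drop_succ_cons]
        rw [ht, h2, ih hst]
      · have ht : t.length + 1 - s = 0 := by omega
        rw [ht, pvF_none s t (by omega)]
        simp

lemma alt_eq (blocks : List (Option Int)) (size : Int) (h1 : 0 < size) (h2 : size ≤ (blocks.length : Int)) :
    find_contiguous_free_alt blocks size =
      (match pvF size.toNat blocks with | some j => (j : Int) | none => -1) := by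
  unfold find_contiguous_free_alt
  rw [if_neg (by omega)]
  rw [PySem.List.pyRange_one]
  rw [List.find?_map]
  have hm : (((blocks.length : Int) - size + 1) - 0).toNat = blocks.length - size.toNat + 1 := by omega
  rw [hm]
  have hsz : ((size.toNat : Nat) : Int) = size := Int.toNat_of_nonneg h1.le
  have hc : ((fun i => (PySem.List.slice blocks (some i) (some (i + size))).all (fun x => x.isNone))
      ∘ (fun k : Nat => (0 : Int) + k))
      = (fun j : Nat => ((blocks.drop j).take size.toNat).all Option.isNone) := by
    funext j
    simp only [Function.comp, zero_add]
    rw [← hsz, PySem.List.slice_natCast_add, Int.toNat_natCast]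
  rw [hc, find_range_eq_pvF size.toNat (by omega) blocks (by omega)]
  cases pvF size.toNat blocks <;> simp

-- ===== VERDICT (by name: the statement is the Claim_ definition above) =====
theorem find_contiguous_free_spec : Claim_equal_find_contiguous_free := by
  intro blocks size _dom
  unfold Spec_find_contiguous_free find_contiguous_free
  by_cases hg : size ≤ 0 ∨ (blocks.length : Int) < size
  · rw [if_pos hg]
    unfold find_contiguous_free_alt
    rw [if_pos hg]
  · rw [if_neg hg]
    push Not at hg
    obtain ⟨h1', h2⟩ := hg
    have hA := fcfLoop_eq size h1' blocks 0 0 0 (by exact_mod_cast h1') (by intro h; omega)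
    simp only [Nat.cast_zero, List.replicate_zero, List.nil_append, sub_zero, zero_add] at hA
    rw [hA, alt_eq blocks size h1' h2]
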